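-- pv_equiv track=rewrite | github.com/SiriusYou/agentic-engineer | tools/scorecard_parser.py | check_duplicate_warnings
-- ===== SOURCE A (Python) =====
-- def check_duplicate_warnings(entries):
--     """Check for duplicate question IDs, return warning strings."""
--     warnings = []
--     seen = {}
--     for i, entry in enumerate(entries):
--         qid = entry.get("question_id", "")
--         if qid in seen:
--             warnings.append(
--                 f"duplicate question_id '{qid}' at entry[{seen[qid]}] and entry[{i}]"
--             )
--         else:
--             seen[qid] = i
--     return warnings
-- ===== SOURCE B (Python) =====
-- def check_duplicate_warnings(entries):
--     """Check for duplicate question IDs, return warning strings."""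
--     keys = [entry.get("question_id", "") for entry in entries]
--     warnings = []
--     for i, qid in enumerate(keys):
--         for j in range(i):
--             if keys[j] == qid:
--                 warnings.append(
--                     f"duplicate question_id '{qid}' at entry[{j}] and entry[{i}]"
--                 )
--                 break
--     return warnings
-- ===== Notes on version B (the rewrite author's own statement) =====
-- stated objective: alternative
-- what changed: Replaces A's hash-map single pass (the 'seen' dict recording first indices) with a dict-free brute-force nested scan: for each position i, scan the prefix keys[:i] left-to-right and report against the first earlier index holding the same qid.
import Mathlib
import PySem

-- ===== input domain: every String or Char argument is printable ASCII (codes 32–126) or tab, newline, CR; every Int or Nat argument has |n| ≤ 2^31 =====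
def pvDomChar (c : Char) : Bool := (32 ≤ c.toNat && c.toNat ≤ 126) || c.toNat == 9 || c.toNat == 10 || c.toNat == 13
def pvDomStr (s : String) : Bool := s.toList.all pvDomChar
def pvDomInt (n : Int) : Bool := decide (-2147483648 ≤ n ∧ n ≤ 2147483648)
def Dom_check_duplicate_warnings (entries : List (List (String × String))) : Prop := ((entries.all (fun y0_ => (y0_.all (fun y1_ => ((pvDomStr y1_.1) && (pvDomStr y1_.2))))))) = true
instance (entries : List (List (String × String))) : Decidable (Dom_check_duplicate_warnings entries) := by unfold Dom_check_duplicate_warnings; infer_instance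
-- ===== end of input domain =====

-- B replaces A's hash-map single pass with a dict-free brute-force nested scan of the prefix (alternative algorithm, not faster).

-- shared helpers: entry.get("question_id", "") and the warning f-string (identical in both Pythons)
def pvKey (entry : List (String × String)) : String :=
  (List.lookup "question_id" entry).getD ""

def pvWarn (qid : String) (j i : Int) : String :=
  "duplicate question_id '" ++ qid ++ "' at entry[" ++ PySem.Int.toStr j ++
    "] and entry[" ++ PySem.Int.toStr i ++ "]"

-- ===== PORT A =====
def check_duplicate_warnings (entries : List (List (String × String))) : List String :=
  ((PySem.List.enumerate entries 0).foldl
    (fun (st : List String × PySem.Dict String Int) p =>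
      let qid := pvKey p.2
      if st.2.contains qid then
        (st.1 ++ [pvWarn qid (st.2.getD qid 0) p.1], st.2)
      else
        (st.1, st.2.insert qid p.1))
    ([], PySem.Dict.empty)).1

-- ===== PORT B =====
-- the inner 'for j in range(i): if keys[j] == qid: append; break' loop
-- (keys[j] ported as pyGetD with default "": every j produced by range(i) is in range)
def pvInner (keys : List String) (qid : String) (i : Int) : List Int → List String
  | [] => []
  | j :: js =>
      if PySem.List.pyGetD keys j "" == qid then [pvWarn qid j i]
      else pvInner keys qid i js

def check_duplicate_warnings_alt (entries : List (List (String × String))) : List String :=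
  let keys := entries.map pvKey
  (PySem.List.enumerate keys 0).foldl
    (fun acc p => acc ++ pvInner keys p.2 p.1 (PySem.List.pyRange 0 p.1 1)) []

-- ===== PRECONDITION & SPEC =====
def Spec_check_duplicate_warnings (entries : List (List (String × String))) (out : List String) : Prop := out = check_duplicate_warnings_alt entries
instance (entries : List (List (String × String))) (out : List String) : Decidable (Spec_check_duplicate_warnings entries out) := by unfold Spec_check_duplicate_warnings; infer_instance

-- ===== CLAIM (what is proved, stated in full; the proofs are below) =====
def Claim_equal_check_duplicate_warnings : Prop := ∀ (entries : List (List (String × String))), Dom_check_duplicate_warnings entries → Spec_check_duplicate_warnings entries (check_duplicate_warnings entries)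

-- ===== LEMMAS AND PROOFS =====

-- the inner scan over range(a, a+m) finds the first j in [a, a+m) with keys[j] = q
lemma pv_inner_spec (m : Nat) : ∀ (a : Nat) (keys : List String) (q : String) (i : Int),
    a + m ≤ keys.length →
    pvInner keys q i (PySem.List.pyRange (a : Int) ((a : Int) + (m : Int)) 1) =
      (match PySem.List.index? ((keys.drop a).take m) q with
        | some j => [pvWarn q ((a : Int) + (j : Int)) i]
        | none => []) := by
  induction m with
  | zero =>
    intro a keys q i _
    rw [PySem.List.pyRange_one_eq_nil (by omega)]
    simp [pvInner]
  | succ m ih =>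
    intro a keys q i hle
    have ha : a < keys.length := by omega
    rw [PySem.List.pyRange_one_cons (by push_cast; omega)]
    have hdrop : keys.drop a = keys[a] :: keys.drop (a + 1) :=
      List.drop_eq_getElem_cons ha
    simp only [pvInner]
    rw [PySem.List.pyGetD_ofNat keys a "" ha]
    by_cases h : keys[a] = q
    · rw [if_pos (by simpa using h)]
      rw [hdrop, List.take_succ_cons, h, PySem.List.index?_cons_self]
      simp
    · rw [if_neg (by simpa using h)]
      have hr : (a : Int) + 1 = ((a + 1 : Nat) : Int) := by push_cast; ring
      have hr2 : (a : Int) + ((m : Nat) + 1 : Nat) = ((a + 1 : Nat) : Int) + (m : Int) := by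
        push_cast; ring
      rw [hr2, hr, ih (a + 1) keys q i (by omega)]
      rw [hdrop, List.take_succ_cons, PySem.List.index?_cons_of_ne _ h]
      cases hidx : PySem.List.index? ((keys.drop (a + 1)).take m) q with
      | none => simp
      | some j => simp; congr 1; omega

-- main loop correspondence: A's dict-driven loop over the remaining entries equals
-- B's nested-scan loop, given that 'seen' records exactly the first occurrence index
-- of each key of the already-processed prefix 'pref' (keys = pref ++ keys of rest).
lemma pv_loop_eq (keys : List String) :
    ∀ (rest : List (List (String × String))) (pref : List String)
      (seen : PySem.Dict String Int) (acc : List String),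
      keys = pref ++ rest.map pvKey →
      (∀ q, seen.get? q = (PySem.List.index? pref q).map (fun j => (j : Int))) →
      ((PySem.List.enumerate rest (pref.length : Int)).foldl
        (fun (st : List String × PySem.Dict String Int) p =>
          let qid := pvKey p.2
          if st.2.contains qid then
            (st.1 ++ [pvWarn qid (st.2.getD qid 0) p.1], st.2)
          else
            (st.1, st.2.insert qid p.1)) (acc, seen)).1
      = (PySem.List.enumerate (rest.map pvKey) (pref.length : Int)).foldl
          (fun acc p => acc ++ pvInner keys p.2 p.1 (PySem.List.pyRange 0 p.1 1)) acc := by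
  intro rest
  induction rest with
  | nil => intro pref seen acc _ _; rfl
  | cons e rest ih =>
    intro pref seen acc hkeys hinv
    have hpref : keys.take pref.length = pref := by
      rw [hkeys]; exact List.take_left
    have hlen : pref.length ≤ keys.length := by
      rw [hkeys]; simp
    -- B's inner scan at index pref.length over the whole keys list
    have hinner : pvInner keys (pvKey e) (pref.length : Int)
        (PySem.List.pyRange 0 (pref.length : Int) 1) =
        (match PySem.List.index? pref (pvKey e) with
          | some j => [pvWarn (pvKey e) (j : Int) (pref.length : Int)]
          | none => []) := by
      have h0 : ((0 : Nat) : Int) = (0 : Int) := by norm_num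
      have := pv_inner_spec pref.length 0 keys (pvKey e) (pref.length : Int)
        (by omega)
      rw [h0, zero_add] at this
      rw [this]
      simp only [List.drop_zero, hpref]
      cases PySem.List.index? pref (pvKey e) <;> simp
    simp only [List.map_cons, PySem.List.enumerate_cons, List.foldl_cons]
    have hstep : ((pref.length : Int) + 1) = (((pref ++ [pvKey e]).length : Nat) : Int) := by
      simp
    cases hidx : PySem.List.index? pref (pvKey e) with
    | some j =>
      have hmem : pvKey e ∈ pref :=
        (PySem.List.index?_isSome_iff pref (pvKey e)).mp (by rw [hidx]; rfl)
      have hcont : seen.contains (pvKey e) = true := by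
        rw [PySem.Dict.contains_eq_isSome_get?, hinv, hidx]; rfl
      have hgd : seen.getD (pvKey e) 0 = (j : Int) := by
        rw [PySem.Dict.getD_eq_get?_getD, hinv, hidx]; rfl
      simp only [if_pos hcont, hgd, hinner, hidx]
      rw [hstep, ih (pref ++ [pvKey e]) seen _ (by rw [hkeys]; simp) ?_]
      intro q
      by_cases hq : q ∈ pref
      · rw [PySem.List.index?_append_of_mem _ hq, hinv]
      · have hqe : q ≠ pvKey e := fun h => hq (h ▸ hmem)
        have h1 : seen.get? q = none := by
          rw [hinv]
          rw [(PySem.List.index?_eq_none_iff pref q).mpr hq]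
          rfl
        have h2 : PySem.List.index? (pref ++ [pvKey e]) q = none :=
          (PySem.List.index?_eq_none_iff _ q).mpr (by simp [hq, hqe])
        rw [h1, h2]; rfl
    | none =>
      have hmem : pvKey e ∉ pref :=
        (PySem.List.index?_eq_none_iff pref (pvKey e)).mp hidx
      have hcont : seen.contains (pvKey e) = false := by
        rw [PySem.Dict.contains_eq_isSome_get?, hinv, hidx]; rfl
      simp only [hcont, Bool.false_eq_true, if_false, hinner, hidx, List.append_nil]
      rw [hstep, ih (pref ++ [pvKey e]) (seen.insert (pvKey e) (pref.length : Int)) _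
        (by rw [hkeys]; simp) ?_]
      intro q
      by_cases hqe : q = pvKey e
      · subst hqe
        rw [PySem.Dict.get?_insert_self, PySem.List.index?_append_singleton_self pref (pvKey e) hmem]
        rfl
      · rw [PySem.Dict.get?_insert_of_ne seen _ hqe, hinv]
        by_cases hq : q ∈ pref
        · rw [PySem.List.index?_append_of_mem _ hq]
        · rw [(PySem.List.index?_eq_none_iff pref q).mpr hq,
            (PySem.List.index?_eq_none_iff _ q).mpr (show q ∉ pref ++ [pvKey e] by simp [hq, hqe])]

-- ===== VERDICT (by name: the statement is the Claim_ definition above) =====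
theorem check_duplicate_warnings_spec : Claim_equal_check_duplicate_warnings := by
  intro entries _
  unfold Spec_check_duplicate_warnings check_duplicate_warnings check_duplicate_warnings_alt
  have := pv_loop_eq (entries.map pvKey) entries [] PySem.Dict.empty []
    (by simp) (by intro q; simp [PySem.Dict.get?_empty])
  simpa using this
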